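-- pv_equiv track=rewrite | github.com/RikiTwiki/o_mobile_operator_dagster | user_code/ops/saima_second_line_daily_statistics/visualization_ops.py | _build_group_ids
-- ===== SOURCE A (Python) =====
-- from typing import Any, Dict, List, Tuple, Optional
--
-- def _build_group_ids(rows: List[Dict[str, Any]]) -> Dict[str, int]:
--     """Стабильные id для пар (status|title), начиная с 1."""
--     group_ids: Dict[str, int] = {}
--     next_id = 1
--     for it in rows:
--         key = f"{it.get('status','')}|{it.get('title','')}"
--         if key not in group_ids:
--             group_ids[key] = next_id
--             next_id += 1
--     return group_ids
-- ===== SOURCE B (Python) =====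
-- from typing import Any, Dict, List
--
-- def _build_group_ids(rows: List[Dict[str, Any]]) -> Dict[str, int]:
--     """Стабильные id для пар (status|title), начиная с 1."""
--     first: Dict[str, int] = {}
--     for i, it in enumerate(rows):
--         key = f"{it.get('status','')}|{it.get('title','')}"
--         first[key] = min(i, first.get(key, i))
--     order = sorted(first, key=first.get)
--     return {key: rank for rank, key in enumerate(order, start=1)}
-- ===== Notes on version B (the rewrite author's own statement) =====
-- stated objective: alternative
-- what changed: Replaces A's guarded single pass (membership test plus a manual next_id counter) by a different mechanism: an unconditional min-update dict recording each key's first occurrence index, then sorting the keys by that index and numbering the sorted keys from 1.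
import Mathlib
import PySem

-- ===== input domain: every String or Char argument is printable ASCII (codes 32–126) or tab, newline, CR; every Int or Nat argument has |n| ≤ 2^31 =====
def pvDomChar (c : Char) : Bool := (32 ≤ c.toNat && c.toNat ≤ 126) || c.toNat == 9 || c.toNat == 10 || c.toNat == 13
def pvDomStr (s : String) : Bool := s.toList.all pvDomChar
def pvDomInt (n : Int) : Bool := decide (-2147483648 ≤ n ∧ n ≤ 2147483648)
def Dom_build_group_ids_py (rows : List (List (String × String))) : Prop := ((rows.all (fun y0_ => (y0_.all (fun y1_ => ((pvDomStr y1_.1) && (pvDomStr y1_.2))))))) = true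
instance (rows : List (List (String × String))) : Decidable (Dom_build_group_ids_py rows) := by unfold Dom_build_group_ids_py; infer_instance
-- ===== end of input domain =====

-- B replaces A's guarded single pass (membership test + manual counter) by a different
-- mechanism: record the minimal index of each key with an unconditional dict update,
-- then sort the keys by that first-occurrence index and number them from 1 (alternative, same order of cost up to the sort).

-- shared helper: the f-string key f"{it.get('status','')}|{it.get('title','')}"
def pvKeyOf (it : List (String × String)) : String :=
  (PySem.Dict.ofList it).getD "status" "" ++ "|" ++ (PySem.Dict.ofList it).getD "title" ""

-- ===== PORT A =====
def build_group_ids_py (rows : List (List (String × String))) : List (String × Int) :=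
  (rows.foldl
    (fun (st : PySem.Dict String Int × Int) it =>
      let key := pvKeyOf it
      if st.1.contains key then st else (st.1.insert key st.2, st.2 + 1))
    (PySem.Dict.empty, 1)).1.items

-- ===== PORT B =====
def build_group_ids_py_alt (rows : List (List (String × String))) : List (String × Int) :=
  -- first[key] = min(i, first.get(key, i)) over enumerate(rows)
  let first := (PySem.List.enumerate rows 0).foldl
    (fun (d : PySem.Dict String Int) p =>
      let key := pvKeyOf p.2
      d.insert key (min p.1 (d.getD key p.1)))
    PySem.Dict.empty
  -- sorted(first, key=first.get): keys sorted by first-occurrence index (first.get k is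
  -- always present for k in first, so getD with any default is exact here)
  let order := PySem.List.sorted first.keys (fun k => first.getD k 0) false
  (PySem.List.enumerate order 1).map (fun p => (p.2, p.1))

-- ===== PRECONDITION & SPEC =====
def Spec_build_group_ids_py (rows : List (List (String × String))) (out : List (String × Int)) : Prop := out = build_group_ids_py_alt rows
instance (rows : List (List (String × String))) (out : List (String × Int)) : Decidable (Spec_build_group_ids_py rows out) := by unfold Spec_build_group_ids_py; infer_instance

-- ===== CLAIM (what is proved, stated in full; the proofs are below) =====
def Claim_equal_build_group_ids_py : Prop := ∀ (rows : List (List (String × String))), Dom_build_group_ids_py rows → Spec_build_group_ids_py rows (build_group_ids_py rows)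

-- ===== LEMMAS AND PROOFS =====

-- ---------- A-side: the guarded counter loop produces enumerate(dedup keys, 1) ----------

-- A's loop body, as a function of the key
def pvStep (st : PySem.Dict String Int × Int) (key : String) : PySem.Dict String Int × Int :=
  if st.1.contains key then st else (st.1.insert key st.2, st.2 + 1)

-- the dict A's loop holds after having seen exactly the distinct keys `seen` (in order)
def pvDictOf (seen : List String) : PySem.Dict String Int :=
  PySem.Dict.mk ((PySem.List.enumerate seen 1).map (fun p => (p.2, p.1)))

lemma pvDictOf_keys (seen : List String) : (pvDictOf seen).keys = seen := by
  simp [pvDictOf, PySem.Dict.keys_mk, List.map_map, Function.comp_def,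
    PySem.List.map_snd_enumerate]

lemma pvDictOf_contains (seen : List String) (k : String) :
    (pvDictOf seen).contains k = true ↔ k ∈ seen := by
  rw [PySem.Dict.contains_iff_mem_keys, pvDictOf_keys]

lemma pvDictOf_not_contains (seen : List String) (k : String) (hk : k ∉ seen) :
    (pvDictOf seen).contains k = false := by
  cases hcc : (pvDictOf seen).contains k with
  | false => rfl
  | true => exact absurd ((pvDictOf_contains seen k).mp hcc) hk

lemma pvDictOf_append (seen : List String) (k : String) (hk : k ∉ seen) :
    (pvDictOf seen).insert k ((seen.length : Int) + 1) = pvDictOf (seen ++ [k]) := by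
  apply PySem.Dict.ext
  rw [PySem.Dict.items_insert_of_not_contains _ _ (pvDictOf_not_contains seen k hk)]
  simp [pvDictOf, PySem.List.enumerate_append, PySem.List.enumerate_cons,
    PySem.List.enumerate_nil, add_comm]

lemma pv_loop (ks : List String) (seen : List String) (h : seen.Nodup) :
    ks.foldl pvStep (pvDictOf seen, (seen.length : Int) + 1)
    = (pvDictOf (ks.foldl PySem.Set.add seen), ((ks.foldl PySem.Set.add seen).length : Int) + 1) := by
  induction ks generalizing seen with
  | nil => rfl
  | cons k ks ih =>
    simp only [List.foldl_cons]
    by_cases hmem : k ∈ seen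
    · have hc : pvStep (pvDictOf seen, (seen.length : Int) + 1) k = (pvDictOf seen, (seen.length : Int) + 1) := by
        simp [pvStep, (pvDictOf_contains seen k).mpr hmem]
      have ha : PySem.Set.add seen k = seen := by
        simp [PySem.Set.add, PySem.Set.contains, hmem]
      rw [hc, ha, ih seen h]
    · have hc : pvStep (pvDictOf seen, (seen.length : Int) + 1) k
          = (pvDictOf (seen ++ [k]), ((seen ++ [k]).length : Int) + 1) := by
        simp [pvStep, pvDictOf_not_contains seen k hmem, pvDictOf_append seen k hmem]
      have ha : PySem.Set.add seen k = seen ++ [k] := by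
        simp [PySem.Set.add, PySem.Set.contains, hmem]
      rw [hc, ha, ih (seen ++ [k])
        (by simp [List.nodup_append, h]; exact fun a ha he => hmem (he ▸ ha))]

-- ---------- B-side: the min-index loop, then the sort is the identity ----------

-- B's loop body, as a function of (index, key)
def pvStepB (d : PySem.Dict String Int) (p : Int × String) : PySem.Dict String Int :=
  d.insert p.2 (min p.1 (d.getD p.2 p.1))

lemma pv_enumerate_map {α β : Type} (f : α → β) (xs : List α) (s : Int) :
    PySem.List.enumerate (xs.map f) s = (PySem.List.enumerate xs s).map (fun p => (p.1, f p.2)) := by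
  induction xs generalizing s with
  | nil => simp [PySem.List.enumerate_nil]
  | cons x xs ih => simp [PySem.List.enumerate_cons, ih]

-- invariant of the min-index loop: keys stay Nodup, item values stay strictly
-- increasing in item order, and all values stay below the running index
lemma pv_first_loop (ks : List String) (i : Int) (d : PySem.Dict String Int)
    (hn : d.keys.Nodup)
    (hp : d.items.Pairwise (fun p q => p.2 < q.2))
    (hv : ∀ p ∈ d.items, p.2 < i) :
    ((PySem.List.enumerate ks i).foldl pvStepB d).keys.Nodup ∧
    ((PySem.List.enumerate ks i).foldl pvStepB d).items.Pairwise (fun p q => p.2 < q.2) := by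
  induction ks generalizing i d with
  | nil => exact ⟨hn, hp⟩
  | cons k ks ih =>
    rw [PySem.List.enumerate_cons, List.foldl_cons]
    by_cases hc : d.contains k = true
    · -- key already present with value v < i: min i v = v, overwrite is a no-op
      have hsome : (d.get? k).isSome := by rw [← PySem.Dict.contains_eq_isSome_get?]; exact hc
      obtain ⟨v, hv'⟩ := Option.isSome_iff_exists.mp hsome
      have hmem : (k, v) ∈ d.items := PySem.Dict.mem_items_of_get?_eq_some d hv'
      have hgd : d.getD k ((i:Int)) = v := by
        rw [PySem.Dict.getD_eq_get?_getD, hv']; rfl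
      have hvi : v < i := hv _ hmem
      have hstep : pvStepB d (i, k) = d := by
        apply PySem.Dict.ext
        simp only [pvStepB, hgd, min_eq_right (le_of_lt hvi)]
        rw [PySem.Dict.items_insert_of_contains _ _ hc]
        have hcongr : ∀ p ∈ d.items,
            (if (p.1 == k) = true then (k, v) else p) = id p := by
          intro p hpmem
          by_cases hk : p.1 == k
          · have hg : d.get? p.1 = some p.2 :=
              PySem.Dict.get?_of_mem_items d (show (p.1, p.2) ∈ d.items by simpa using hpmem) hn
            have hp1 : p.1 = k := by simpa using hk
            have hp2 : p.2 = v := by rw [hp1] at hg; rw [hg] at hv'; exact (Option.some.inj hv')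
            simp [← hp1, ← hp2]
          · simp [hk]
        rw [List.map_congr_left hcongr, List.map_id]
      rw [hstep]
      exact ih (i + 1) d hn hp (fun p hp' => lt_trans (hv p hp') (by omega))
    · -- fresh key: getD returns the default i, min i i = i, the pair (k, i) is appended
      have hc' : d.contains k = false := by revert hc; cases d.contains k <;> simp
      have hgd : d.getD k ((i:Int)) = i := by
        have : d.get? k = none := by
          cases hq : d.get? k with
          | none => rfl
          | some v =>
            have : (d.get? k).isSome := by rw [hq]; rfl
            rw [← PySem.Dict.contains_eq_isSome_get?] at this
            rw [this] at hc'; cases hc'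
        rw [PySem.Dict.getD_eq_get?_getD, this]; rfl
      have hstep : pvStepB d (i, k) = PySem.Dict.mk (d.items ++ [(k, i)]) := by
        apply PySem.Dict.ext
        simp only [pvStepB, hgd, min_self]
        rw [PySem.Dict.items_insert_of_not_contains _ _ hc']
      rw [hstep]
      have hkeys : (PySem.Dict.mk (d.items ++ [(k, i)])).keys = d.keys ++ [k] := by
        simp [PySem.Dict.keys]
      refine ih (i + 1) _ ?_ ?_ ?_
      · rw [hkeys]
        rw [List.nodup_append]
        refine ⟨hn, List.nodup_singleton k, ?_⟩
        intro a ha b hb he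
        simp only [List.mem_singleton] at hb
        subst hb; subst he
        exact absurd ((PySem.Dict.contains_iff_mem_keys d a).mpr ha) (by simp [hc'])
      · show (d.items ++ [(k, i)]).Pairwise (fun p q => p.2 < q.2)
        rw [List.pairwise_append]
        exact ⟨hp, List.pairwise_singleton _ _, fun p hp' q hq => by
          simp only [List.mem_singleton] at hq; rw [hq]; exact hv p hp'⟩
      · show ∀ p ∈ d.items ++ [(k, i)], p.2 < i + 1
        intro p hp'
        rcases List.mem_append.mp hp' with h1 | h1
        · exact lt_trans (hv p h1) (by omega)
        · simp only [List.mem_singleton] at h1; rw [h1]; omega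

-- from the item invariant: the keys list is strictly key-increasing under getD
lemma pv_keys_pairwise (d : PySem.Dict String Int)
    (hn : d.keys.Nodup) (hp : d.items.Pairwise (fun p q => p.2 < q.2)) :
    d.keys.Pairwise (fun a b => d.getD a 0 < d.getD b 0) := by
  have hitems : d.items.Pairwise (fun p q => d.getD p.1 0 < d.getD q.1 0) := by
    refine hp.imp_of_mem ?_
    intro p q hpm hqm hlt
    rw [PySem.Dict.getD_of_mem_items d (show (p.1, p.2) ∈ d.items by simpa using hpm) hn,
        PySem.Dict.getD_of_mem_items d (show (q.1, q.2) ∈ d.items by simpa using hqm) hn]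
    exact hlt
  have hk : d.keys = d.items.map (fun p => p.1) := rfl
  rw [hk, List.pairwise_map]
  exact hitems

-- ===== VERDICT (by name: the statement is the Claim_ definition above) =====
theorem build_group_ids_py_spec : Claim_equal_build_group_ids_py := by
  intro rows _
  show build_group_ids_py rows = build_group_ids_py_alt rows
  -- A's result is enumerate(dedup keys, 1), swapped
  have hA : build_group_ids_py rows
      = ((rows.map pvKeyOf).foldl pvStep (pvDictOf [], (([] : List String).length : Int) + 1)).1.items := by
    rw [List.foldl_map]; rfl
  rw [hA, pv_loop (rows.map pvKeyOf) [] List.nodup_nil]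
  -- B's first-index dict
  set firstD := (PySem.List.enumerate rows 0).foldl
    (fun (d : PySem.Dict String Int) p =>
      d.insert (pvKeyOf p.2) (min p.1 (d.getD (pvKeyOf p.2) p.1)))
    PySem.Dict.empty with hfirst
  have hfold : firstD = (PySem.List.enumerate (rows.map pvKeyOf) 0).foldl pvStepB PySem.Dict.empty := by
    rw [pv_enumerate_map, List.foldl_map]; rfl
  -- its keys are the first-seen distinct keys
  have hkeys : firstD.keys = (rows.map pvKeyOf).foldl PySem.Set.add [] := by
    rw [hfirst, PySem.Dict.keys_foldl_insert_key]
    have : (PySem.List.enumerate rows 0).map (fun p => pvKeyOf p.2)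
        = rows.map pvKeyOf := by
      have := PySem.List.map_snd_enumerate rows (0 : Int)
      calc (PySem.List.enumerate rows 0).map (fun p => pvKeyOf p.2)
          = ((PySem.List.enumerate rows 0).map (fun p => p.2)).map pvKeyOf := by
            rw [List.map_map]; rfl
        _ = rows.map pvKeyOf := by rw [this]
    rw [this]
    simp [PySem.Dict.keys_empty, PySem.Set.update]
  -- the invariant holds for firstD
  have hinv := pv_first_loop (rows.map pvKeyOf) 0 PySem.Dict.empty
    (by decide) (by decide) (by intro p hp'; simp [PySem.Dict.empty] at hp')
  rw [← hfold] at hinv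
  -- so the sort in B is the identity on firstD.keys
  have hsort : PySem.List.sorted firstD.keys (fun k => firstD.getD k 0) false = firstD.keys :=
    PySem.List.sorted_eq_of_perm_of_pairwise_lt firstD.keys firstD.keys
      (fun k => firstD.getD k 0) (List.Perm.refl _) (pv_keys_pairwise firstD hinv.1 hinv.2)
  show (pvDictOf ((rows.map pvKeyOf).foldl PySem.Set.add [])).items = _
  show _ = (PySem.List.enumerate
      (PySem.List.sorted firstD.keys (fun k => firstD.getD k 0) false) 1).map (fun p => (p.2, p.1))
  rw [hsort, hkeys]
  rfl
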